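-- pv_equiv track=rewrite | github.com/pypi-data/pypi-mirror-395 | packages/moltres/moltres-0.23.2-py3-none-any.whl/moltres/utils/exceptions.py | _suggest_table_name
-- ===== SOURCE A (Python) =====
-- from typing import Optional, Sequence
--
-- def _levenshtein_distance(s1: str, s2: str) -> int:
--     """Calculate Levenshtein distance between two strings."""
--     if len(s1) < len(s2):
--         return _levenshtein_distance(s2, s1)
--     if len(s2) == 0:
--         return len(s1)
--     previous_row = list(range(len(s2) + 1))
--     for i, c1 in enumerate(s1):
--         current_row = [i + 1]
--         for j, c2 in enumerate(s2):
--             insertions = previous_row[j + 1] + 1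
--             deletions = current_row[j] + 1
--             substitutions = previous_row[j] + (c1 != c2)
--             current_row.append(min(insertions, deletions, substitutions))
--         previous_row = current_row
--     return previous_row[-1]
--
-- def _suggest_table_name(table_name: str, available_tables: Sequence[str]) -> str:
--     """Suggest similar table names when a table is not found."""
--     if not available_tables:
--         return f"Table '{table_name}' does not exist. No tables are available in this database."
--     # Calculate similarity scores
--     scores = [
--         (tbl, _levenshtein_distance(table_name.lower(), tbl.lower())) for tbl in available_tables
--     ]
--     scores.sort(key=lambda x: x[1])
--     # Get top 3 suggestions
--     suggestions = [tbl for tbl, _ in scores[:3] if scores[0][1] <= len(table_name)]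
--     if suggestions:
--         if len(suggestions) == 1:
--             return f"Table '{table_name}' does not exist. Did you mean: '{suggestions[0]}'?"
--         else:
--             suggestions_str = ", ".join(f"'{s}'" for s in suggestions)
--             return f"Table '{table_name}' does not exist. Did you mean one of: {suggestions_str}?"
--     return (
--         f"Table '{table_name}' does not exist. "
--         f"Available tables: {', '.join(available_tables[:10])}"
--         + ("..." if len(available_tables) > 10 else "")
--     )
-- ===== SOURCE B (Python) =====
-- from typing import Sequence
--
--
-- def _levenshtein_distance(s1: str, s2: str) -> int:
--     """Edit distance via top-down memoized recursion on index pairs (i, j) =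
--     distance between s1[:i] and s2[:j]."""
--     memo = {}
--
--     def d(i: int, j: int) -> int:
--         if i == 0:
--             return j
--         if j == 0:
--             return i
--         r = memo.get((i, j))
--         if r is None:
--             r = min(
--                 d(i - 1, j) + 1,
--                 d(i, j - 1) + 1,
--                 d(i - 1, j - 1) + (s1[i - 1] != s2[j - 1]),
--             )
--             memo[(i, j)] = r
--         return r
--
--     return d(len(s1), len(s2))
--
--
-- def _suggest_table_name(table_name: str, available_tables: Sequence[str]) -> str:
--     if not available_tables:
--         return f"Table '{table_name}' does not exist. No tables are available in this database."
--     target = table_name.lower()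
--     scored = [(tbl, _levenshtein_distance(target, tbl.lower())) for tbl in available_tables]
--     best = min(d for _, d in scored)
--     if len(table_name) < best:
--         listing = ", ".join(available_tables[:10])
--         more = "..." if len(available_tables) > 10 else ""
--         return f"Table '{table_name}' does not exist. Available tables: {listing}{more}"
--     top = [tbl for tbl, _ in sorted(scored, key=lambda p: p[1])[:3]]
--     if len(top) == 1:
--         return f"Table '{table_name}' does not exist. Did you mean: '{top[0]}'?"
--     joined = ", ".join(f"'{t}'" for t in top)
--     return f"Table '{table_name}' does not exist. Did you mean one of: {joined}?"
-- ===== Notes on version B (the rewrite author's own statement) =====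
-- stated objective: alternative
-- what changed: The bottom-up rolling-row DP (with argument-swap and empty-string early return) for Levenshtein distance is replaced by a top-down memoized recursion on index pairs, and the outer function is restructured to lower-case the target once, gate on a one-pass minimum of the distances (so the fallback branch never sorts), and sort only when emitting suggestions.
import Mathlib
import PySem

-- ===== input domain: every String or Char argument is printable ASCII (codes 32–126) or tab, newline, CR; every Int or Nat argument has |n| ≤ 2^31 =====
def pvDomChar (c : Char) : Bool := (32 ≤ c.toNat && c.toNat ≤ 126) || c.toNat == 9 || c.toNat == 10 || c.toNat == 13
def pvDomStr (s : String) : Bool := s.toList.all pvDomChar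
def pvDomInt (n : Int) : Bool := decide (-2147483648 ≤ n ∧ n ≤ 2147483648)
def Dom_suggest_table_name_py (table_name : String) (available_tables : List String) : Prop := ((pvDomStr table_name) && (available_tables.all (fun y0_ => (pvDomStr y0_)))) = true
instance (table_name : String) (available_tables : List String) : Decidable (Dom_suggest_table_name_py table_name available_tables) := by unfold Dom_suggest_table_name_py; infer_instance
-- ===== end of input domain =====

-- B replaces A's bottom-up rolling-row Levenshtein DP (with argument swap and empty-string
-- early return) by a top-down memoized recursion on index pairs, and restructures the outer
-- function: the target is lower-cased once, the gate is a one-pass minimum of the distances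
-- (the fallback branch never sorts), and the stable sort runs only in the suggestion branch.

-- ===== PORT A =====
-- the rolling-row DP body of _levenshtein_distance (after the one-step swap recursion)
def lev_dp_py (c1 c2 : List Char) : Int :=
  if (c2.length : Int) = 0 then (c1.length : Int)
  else
    let prev0 : List Int := PySem.List.pyRange 0 ((c2.length : Int) + 1) 1
    let prev := (PySem.List.enumerate c1 0).foldl (fun prev ic =>
        (PySem.List.enumerate c2 0).foldl (fun cur jc =>
            let ins := PySem.List.pyGetD prev (jc.1 + 1) 0 + 1
            let del := PySem.List.pyGetD cur jc.1 0 + 1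
            let sub := PySem.List.pyGetD prev jc.1 0 + (if ic.2 ≠ jc.2 then (1 : Int) else 0)
            cur ++ [min ins (min del sub)]) [ic.1 + 1]) prev0
    PySem.List.pyGetD prev (-1) 0

-- _levenshtein_distance: the single swap recursion 'if len(s1) < len(s2): return f(s2, s1)' unfolded once
def lev_py (s1 s2 : String) : Int :=
  if PySem.Str.len s1 < PySem.Str.len s2 then lev_dp_py s2.toList s1.toList
  else lev_dp_py s1.toList s2.toList

def suggest_table_name_py (table_name : String) (available_tables : List String) : String :=
  if available_tables = [] then
    "Table '" ++ table_name ++ "' does not exist. No tables are available in this database."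
  else
    let scores := available_tables.map
      (fun tbl => (tbl, lev_py (PySem.Str.lower table_name) (PySem.Str.lower tbl)))
    let sortedScores := PySem.List.sorted scores (fun x => x.2) false
    let suggestions := ((PySem.List.slice sortedScores none (some 3)).filter
        (fun _ => decide ((PySem.List.pyGetD sortedScores 0 ("", (0 : Int))).2 ≤ PySem.Str.len table_name))).map
      (fun p => p.1)
    if suggestions = [] then
      "Table '" ++ table_name ++ "' does not exist. Available tables: "
        ++ PySem.Str.join ", " (PySem.List.slice available_tables none (some 10))
        ++ (if 10 < available_tables.length then "..." else "")
    else
      if suggestions.length = 1 then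
        "Table '" ++ table_name ++ "' does not exist. Did you mean: '"
          ++ PySem.List.pyGetD suggestions 0 "" ++ "'?"
      else
        "Table '" ++ table_name ++ "' does not exist. Did you mean one of: "
          ++ PySem.Str.join ", " (suggestions.map (fun s => "'" ++ s ++ "'")) ++ "?"

-- ===== PORT B =====
-- the memoized inner function d(i, j) of Source B, memo threaded through
def lev_memo_go (c1 c2 : List Char) : Nat → Nat → PySem.Dict (Int × Int) Int → Int × PySem.Dict (Int × Int) Int
  | 0, j, m => ((j : Int), m)
  | i+1, 0, m => ((i : Int) + 1, m)
  | i+1, j+1, m =>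
    match PySem.Dict.get? m ((i : Int) + 1, (j : Int) + 1) with
    | some r => (r, m)
    | none =>
      let p1 := lev_memo_go c1 c2 i (j+1) m
      let p2 := lev_memo_go c1 c2 (i+1) j p1.2
      let p3 := lev_memo_go c1 c2 i j p2.2
      let r := min (p1.1 + 1) (min (p2.1 + 1)
        (p3.1 + (if PySem.List.pyGetD c1 (i : Int) ' ' ≠ PySem.List.pyGetD c2 (j : Int) ' ' then (1 : Int) else 0)))
      (r, PySem.Dict.insert p3.2 ((i : Int) + 1, (j : Int) + 1) r)
  termination_by i j _ => i + j

def lev_memo_py (s1 s2 : String) : Int :=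
  (lev_memo_go s1.toList s2.toList s1.toList.length s2.toList.length PySem.Dict.empty).1

def suggest_table_name_py_alt (table_name : String) (available_tables : List String) : String :=
  if available_tables = [] then
    "Table '" ++ table_name ++ "' does not exist. No tables are available in this database."
  else
    let target := PySem.Str.lower table_name
    let scored := available_tables.map (fun tbl => (tbl, lev_memo_py target (PySem.Str.lower tbl)))
    let best := (PySem.List.min? (scored.map (fun p => p.2)) (fun x => x)).getD 0
    if PySem.Str.len table_name < best then
      "Table '" ++ table_name ++ "' does not exist. Available tables: "
        ++ PySem.Str.join ", " (PySem.List.slice available_tables none (some 10))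
        ++ (if 10 < available_tables.length then "..." else "")
    else
      let top := (PySem.List.slice (PySem.List.sorted scored (fun p => p.2) false) none (some 3)).map
        (fun p => p.1)
      if top.length = 1 then
        "Table '" ++ table_name ++ "' does not exist. Did you mean: '"
          ++ PySem.List.pyGetD top 0 "" ++ "'?"
      else
        "Table '" ++ table_name ++ "' does not exist. Did you mean one of: "
          ++ PySem.Str.join ", " (top.map (fun t => "'" ++ t ++ "'")) ++ "?"

-- ===== PRECONDITION & SPEC =====
def Spec_suggest_table_name_py (table_name : String) (available_tables : List String) (out : String) : Prop := out = suggest_table_name_py_alt table_name available_tables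
instance (table_name : String) (available_tables : List String) (out : String) : Decidable (Spec_suggest_table_name_py table_name available_tables out) := by unfold Spec_suggest_table_name_py; infer_instance

-- ===== CLAIM (what is proved, stated in full; the proofs are below) =====
def Claim_equal_suggest_table_name_py : Prop := ∀ (table_name : String) (available_tables : List String), Dom_suggest_table_name_py table_name available_tables → Spec_suggest_table_name_py table_name available_tables (suggest_table_name_py table_name available_tables)

-- ===== LEMMAS AND PROOFS =====

-- the shared mathematical recurrence: Dspec c1 c2 i j = the DP value for prefixes c1[:i], c2[:j]
def Dspec (c1 c2 : List Char) : Nat → Nat → Int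
  | 0, j => (j : Int)
  | i+1, 0 => (i : Int) + 1
  | i+1, j+1 =>
      min (Dspec c1 c2 i (j+1) + 1)
        (min (Dspec c1 c2 (i+1) j + 1)
          (Dspec c1 c2 i j + (if PySem.List.pyGetD c1 (i : Int) ' ' ≠ PySem.List.pyGetD c2 (j : Int) ' ' then (1 : Int) else 0)))
  termination_by i j => i + j

-- every value stored in B's memo dictionary is the Dspec value of its key
def MemoOK (c1 c2 : List Char) (m : PySem.Dict (Int × Int) Int) : Prop :=
  ∀ (a b : Nat) (v : Int), PySem.Dict.get? m ((a : Int), (b : Int)) = some v → v = Dspec c1 c2 a b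

-- row i of A's DP table
def rowL (c1 c2 : List Char) (i : Nat) : List Int := (List.range (c2.length + 1)).map (fun j => Dspec c1 c2 i j)


theorem Dspec_zero_right (c1 c2 : List Char) (i : Nat) : Dspec c1 c2 i 0 = (i : Int) := by
  cases i <;> simp [Dspec]

theorem cost_symm (x y : Char) : (if x ≠ y then (1:Int) else 0) = (if y ≠ x then (1:Int) else 0) := by
  by_cases h : x = y
  · simp [h]
  · simp [h, Ne.symm h]

theorem Dspec_symm_aux (c1 c2 : List Char) : ∀ (n i j : Nat), i + j ≤ n → Dspec c1 c2 i j = Dspec c2 c1 j i := by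
  intro n
  induction n with
  | zero =>
    intro i j h
    have hi : i = 0 := by omega
    have hj : j = 0 := by omega
    subst hi; subst hj; simp [Dspec]
  | succ n ih =>
    intro i j h
    match i, j with
    | 0, j => simp [Dspec, Dspec_zero_right]
    | i+1, 0 => simp [Dspec, Dspec_zero_right]
    | i+1, j+1 =>
      show Dspec c1 c2 (i+1) (j+1) = Dspec c2 c1 (j+1) (i+1)
      rw [show Dspec c1 c2 (i+1) (j+1) =
        min (Dspec c1 c2 i (j+1) + 1)
          (min (Dspec c1 c2 (i+1) j + 1)
            (Dspec c1 c2 i j + (if PySem.List.pyGetD c1 (i : Int) ' ' ≠ PySem.List.pyGetD c2 (j : Int) ' ' then (1 : Int) else 0))) from by rw [Dspec]]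
      rw [show Dspec c2 c1 (j+1) (i+1) =
        min (Dspec c2 c1 j (i+1) + 1)
          (min (Dspec c2 c1 (j+1) i + 1)
            (Dspec c2 c1 j i + (if PySem.List.pyGetD c2 (j : Int) ' ' ≠ PySem.List.pyGetD c1 (i : Int) ' ' then (1 : Int) else 0))) from by rw [Dspec]]
      rw [ih i (j+1) (by omega), ih (i+1) j (by omega), ih i j (by omega), cost_symm]
      rw [min_left_comm]

theorem Dspec_symm (c1 c2 : List Char) (i j : Nat) : Dspec c1 c2 i j = Dspec c2 c1 j i :=
  Dspec_symm_aux c1 c2 (i+j) i j le_rfl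

theorem memoOK_empty (c1 c2 : List Char) : MemoOK c1 c2 PySem.Dict.empty := by
  intro a b v hv
  simp [PySem.Dict.get?_empty] at hv

theorem lev_memo_go_eq_aux (c1 c2 : List Char) : ∀ (n : Nat), ∀ (i j : Nat), i + j ≤ n →
    ∀ (m : PySem.Dict (Int × Int) Int), MemoOK c1 c2 m →
    (lev_memo_go c1 c2 i j m).1 = Dspec c1 c2 i j ∧ MemoOK c1 c2 (lev_memo_go c1 c2 i j m).2 := by
  intro n
  induction n with
  | zero =>
    intro i j h m hm
    have hi : i = 0 := by omega
    have hj : j = 0 := by omega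
    subst hi; subst hj
    exact ⟨by simp [lev_memo_go, Dspec], by simpa [lev_memo_go] using hm⟩
  | succ n ih =>
    intro i j h m hm
    match i, j with
    | 0, j => exact ⟨by simp [lev_memo_go, Dspec], by simpa [lev_memo_go] using hm⟩
    | i+1, 0 => exact ⟨by simp [lev_memo_go, Dspec], by simpa [lev_memo_go] using hm⟩
    | i+1, j+1 =>
      cases hget : PySem.Dict.get? m ((i : Int) + 1, (j : Int) + 1) with
      | some r =>
        have hr : r = Dspec c1 c2 (i+1) (j+1) := by
          apply hm (i+1) (j+1) r
          push_cast
          exact hget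
        constructor
        · simp [lev_memo_go, hget, hr]
        · simpa [lev_memo_go, hget] using hm
      | none =>
        obtain ⟨h1, hm1⟩ := ih i (j+1) (by omega) m hm
        obtain ⟨h2, hm2⟩ := ih (i+1) j (by omega) _ hm1
        obtain ⟨h3, hm3⟩ := ih i j (by omega) _ hm2
        have hval : (lev_memo_go c1 c2 (i+1) (j+1) m).1 = Dspec c1 c2 (i+1) (j+1) := by
          simp only [lev_memo_go, hget]
          rw [h1, h2, h3]
          rw [show Dspec c1 c2 (i+1) (j+1) =
            min (Dspec c1 c2 i (j+1) + 1)
              (min (Dspec c1 c2 (i+1) j + 1)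
                (Dspec c1 c2 i j + (if PySem.List.pyGetD c1 (i : Int) ' ' ≠ PySem.List.pyGetD c2 (j : Int) ' ' then (1 : Int) else 0))) from by rw [Dspec]]
        constructor
        · exact hval
        · simp only [lev_memo_go, hget]
          intro a b v hv
          rw [PySem.Dict.get?_insert] at hv
          split at hv
          · rename_i hk
            have hka : a = i + 1 := by
              have h' : (a : Int) = (i : Int) + 1 := congrArg Prod.fst hk
              omega
            have hkb : b = j + 1 := by
              have h' : (b : Int) = (j : Int) + 1 := congrArg Prod.snd hk
              omega
            subst hka; subst hkb
            have hv' : v = min ((lev_memo_go c1 c2 i (j+1) m).1 + 1)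
                (min ((lev_memo_go c1 c2 (i+1) j (lev_memo_go c1 c2 i (j+1) m).2).1 + 1)
                  ((lev_memo_go c1 c2 i j (lev_memo_go c1 c2 (i+1) j (lev_memo_go c1 c2 i (j+1) m).2).2).1
                    + (if PySem.List.pyGetD c1 (i : Int) ' ' ≠ PySem.List.pyGetD c2 (j : Int) ' ' then (1 : Int) else 0))) :=
              (Option.some.inj hv).symm
            rw [hv', h1, h2, h3]
            rw [show Dspec c1 c2 (i+1) (j+1) =
              min (Dspec c1 c2 i (j+1) + 1)
                (min (Dspec c1 c2 (i+1) j + 1)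
                  (Dspec c1 c2 i j + (if PySem.List.pyGetD c1 (i : Int) ' ' ≠ PySem.List.pyGetD c2 (j : Int) ' ' then (1 : Int) else 0))) from by rw [Dspec]]
          · exact hm3 a b v hv


theorem pyGetD_neg_one_append {α : Type} (xs : List α) (x : α) (d : α) :
    PySem.List.pyGetD (xs ++ [x]) (-1) d = x := by
  simp [PySem.List.pyGetD, PySem.List.pyGet?, PySem.List.pyIdx?]

theorem inner_fold (c1 c2 : List Char) (i : Nat) (hi : i < c1.length) :
    ∀ (k t : Nat), t + k = c2.length →
    (PySem.List.enumerate (c2.drop t) (t : Int)).foldl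
      (fun cur jc =>
        cur ++ [min (PySem.List.pyGetD (rowL c1 c2 i) (jc.1 + 1) 0 + 1)
          (min (PySem.List.pyGetD cur jc.1 0 + 1)
            (PySem.List.pyGetD (rowL c1 c2 i) jc.1 0 + (if c1[i] ≠ jc.2 then (1 : Int) else 0)))])
      ((List.range (t+1)).map (fun j => Dspec c1 c2 (i+1) j))
    = rowL c1 c2 (i+1) := by
  intro k
  induction k with
  | zero =>
    intro t ht
    rw [List.drop_eq_nil_of_le (by omega)]
    have ht' : c2.length = t := by omega
    simp only [PySem.List.enumerate_nil, List.foldl_nil, rowL, ht']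
  | succ k ih =>
    intro t ht
    have htl : t < c2.length := by omega
    rw [List.drop_eq_getElem_cons htl, PySem.List.enumerate_cons, List.foldl_cons]
    have hins : PySem.List.pyGetD (rowL c1 c2 i) ((t : Int) + 1) 0 = Dspec c1 c2 i (t+1) := by
      rw [show ((t : Int) + 1) = ((t+1 : Nat) : Int) by push_cast; ring]
      rw [PySem.List.pyGetD_natCast, rowL, PySem.List.getD_map_range _ _ _ _ (by omega)]
    have hsub : PySem.List.pyGetD (rowL c1 c2 i) (t : Int) 0 = Dspec c1 c2 i t := by
      rw [PySem.List.pyGetD_natCast, rowL, PySem.List.getD_map_range _ _ _ _ (by omega)]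
    have hdel : PySem.List.pyGetD ((List.range (t+1)).map (fun j => Dspec c1 c2 (i+1) j)) (t : Int) 0
        = Dspec c1 c2 (i+1) t := by
      rw [PySem.List.pyGetD_natCast, PySem.List.getD_map_range _ _ _ _ (by omega)]
    have hc1 : PySem.List.pyGetD c1 (i : Int) ' ' = c1[i] := by
      rw [PySem.List.pyGetD_natCast, List.getD_eq_getElem _ _ hi]
    have hc2 : PySem.List.pyGetD c2 (t : Int) ' ' = c2[t] := by
      rw [PySem.List.pyGetD_natCast, List.getD_eq_getElem _ _ htl]
    have hnew : min (Dspec c1 c2 i (t+1) + 1)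
        (min (Dspec c1 c2 (i+1) t + 1)
          (Dspec c1 c2 i t + (if c1[i] ≠ c2[t] then (1 : Int) else 0)))
        = Dspec c1 c2 (i+1) (t+1) := by
      rw [show Dspec c1 c2 (i+1) (t+1) =
        min (Dspec c1 c2 i (t+1) + 1)
          (min (Dspec c1 c2 (i+1) t + 1)
            (Dspec c1 c2 i t + (if PySem.List.pyGetD c1 (i : Int) ' ' ≠ PySem.List.pyGetD c2 (t : Int) ' ' then (1 : Int) else 0))) from by rw [Dspec]]
      rw [hc1, hc2]
    dsimp only
    rw [hins, hdel, hsub, hnew]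
    rw [show List.map (fun j => Dspec c1 c2 (i+1) j) (List.range (t+1)) ++ [Dspec c1 c2 (i+1) (t+1)]
        = List.map (fun j => Dspec c1 c2 (i+1) j) (List.range (t+1+1)) from by
      rw [List.range_succ (n := t+1), List.map_append, List.map_singleton]]
    rw [show ((t : Int) + 1) = ((t+1 : Nat) : Int) by push_cast; ring]
    exact ih (t+1) (by omega)

theorem outer_fold (c1 c2 : List Char) :
    ∀ (k t : Nat), t + k = c1.length →
    (PySem.List.enumerate (c1.drop t) (t : Int)).foldl
      (fun prev ic =>
        (PySem.List.enumerate c2 0).foldl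
          (fun cur jc =>
            cur ++ [min (PySem.List.pyGetD prev (jc.1 + 1) 0 + 1)
              (min (PySem.List.pyGetD cur jc.1 0 + 1)
                (PySem.List.pyGetD prev jc.1 0 + (if ic.2 ≠ jc.2 then (1 : Int) else 0)))])
          [ic.1 + 1])
      (rowL c1 c2 t)
    = rowL c1 c2 c1.length := by
  intro k
  induction k with
  | zero =>
    intro t ht
    rw [List.drop_eq_nil_of_le (by omega)]
    have ht' : t = c1.length := by omega
    simp only [PySem.List.enumerate_nil, List.foldl_nil, ht']
  | succ k ih =>
    intro t ht
    have htl : t < c1.length := by omega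
    rw [List.drop_eq_getElem_cons htl, PySem.List.enumerate_cons, List.foldl_cons]
    have hstep : (PySem.List.enumerate c2 0).foldl
          (fun cur jc =>
            cur ++ [min (PySem.List.pyGetD (rowL c1 c2 t) (jc.1 + 1) 0 + 1)
              (min (PySem.List.pyGetD cur jc.1 0 + 1)
                (PySem.List.pyGetD (rowL c1 c2 t) jc.1 0 + (if c1[t] ≠ jc.2 then (1 : Int) else 0)))])
          [(t : Int) + 1]
        = rowL c1 c2 (t+1) := by
      rw [show ([(t : Int) + 1] : List Int) = (List.range (0+1)).map (fun j => Dspec c1 c2 (t+1) j) from by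
        simp [Dspec]]
      exact inner_fold c1 c2 t htl c2.length 0 (by omega)
    dsimp only
    rw [hstep]
    rw [show ((t : Int) + 1) = ((t+1 : Nat) : Int) by push_cast; ring]
    exact ih (t+1) (by omega)

theorem lev_dp_eq (c1 c2 : List Char) : lev_dp_py c1 c2 = Dspec c1 c2 c1.length c2.length := by
  rw [lev_dp_py]
  by_cases h0 : (c2.length : Int) = 0
  · rw [if_pos h0]
    have hl : c2.length = 0 := by omega
    rw [hl, Dspec_zero_right]
  · rw [if_neg h0]
    have hrow0 : PySem.List.pyRange 0 ((c2.length : Int) + 1) 1 = rowL c1 c2 0 := by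
      rw [PySem.List.pyRange_one, rowL]
      have : ((c2.length : Int) + 1 - 0).toNat = c2.length + 1 := by omega
      rw [this]
      apply List.map_congr_left
      intro a _
      simp [Dspec]
    have hfold : (PySem.List.enumerate c1 0).foldl
        (fun prev ic =>
          (PySem.List.enumerate c2 0).foldl
            (fun cur jc =>
              cur ++ [min (PySem.List.pyGetD prev (jc.1 + 1) 0 + 1)
                (min (PySem.List.pyGetD cur jc.1 0 + 1)
                  (PySem.List.pyGetD prev jc.1 0 + (if ic.2 ≠ jc.2 then (1 : Int) else 0)))])
            [ic.1 + 1])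
        (rowL c1 c2 0)
        = rowL c1 c2 c1.length := outer_fold c1 c2 c1.length 0 (by omega)
    dsimp only
    rw [hrow0, hfold]
    rw [show rowL c1 c2 c1.length
        = (List.range c2.length).map (fun j => Dspec c1 c2 c1.length j) ++ [Dspec c1 c2 c1.length c2.length] from by
      rw [rowL, List.range_succ, List.map_append, List.map_singleton]]
    rw [pyGetD_neg_one_append]



theorem lev_eq (s1 s2 : String) : lev_py s1 s2 = lev_memo_py s1 s2 := by
  have hmemo : lev_memo_py s1 s2 = Dspec s1.toList s2.toList s1.toList.length s2.toList.length := by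
    rw [lev_memo_py]
    exact (lev_memo_go_eq_aux s1.toList s2.toList (s1.toList.length + s2.toList.length) _ _ le_rfl _ (memoOK_empty _ _)).1
  rw [hmemo, lev_py]
  split
  · rw [lev_dp_eq, Dspec_symm]
  · rw [lev_dp_eq]

theorem head_sorted_eq_min (S : List (String × Int)) (h : S ≠ []) :
    ∃ hd tl, PySem.List.sorted S (fun x => x.2) false = hd :: tl ∧
      (PySem.List.min? (S.map (fun p => p.2)) (fun x => x)).getD 0 = hd.2 := by
  cases hsrt : PySem.List.sorted S (fun x => x.2) false with
  | nil => exact absurd ((PySem.List.sorted_eq_nil_iff S _ false).1 hsrt) h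
  | cons hd tl =>
    refine ⟨hd, tl, rfl, ?_⟩
    cases hmin : PySem.List.min? (S.map (fun p => p.2)) (fun x => x) with
    | none =>
      rw [PySem.List.min?_eq_none_iff, List.map_eq_nil_iff] at hmin
      exact absurd hmin h
    | some m =>
      have hmem := PySem.List.min?_mem hmin
      have hlow := PySem.List.min?_isMin hmin
      have hhd : hd ∈ S := by
        have hmem' : hd ∈ PySem.List.sorted S (fun x => x.2) false := by
          rw [hsrt]; exact List.mem_cons_self
        exact (PySem.List.mem_sorted S _ false hd).1 hmem'
      have hle := PySem.List.key_head_sorted_le S (fun x => x.2) hsrt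
      obtain ⟨p, hp, hpm⟩ := List.mem_map.1 hmem
      have h1 : hd.2 ≤ m := hpm ▸ hle p hp
      have h2 : m ≤ hd.2 := hlow hd.2 (List.mem_map_of_mem hhd)
      simp [le_antisymm h2 h1]

-- ===== VERDICT (by name: the statement is the Claim_ definition above) =====
theorem suggest_table_name_py_spec : Claim_equal_suggest_table_name_py := by
  unfold Claim_equal_suggest_table_name_py
  intro tn ts _
  unfold Spec_suggest_table_name_py suggest_table_name_py suggest_table_name_py_alt
  by_cases hts : ts = []
  · rw [if_pos hts, if_pos hts]
  · rw [if_neg hts, if_neg hts]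
    dsimp only
    rw [show ts.map (fun tbl => (tbl, lev_py (PySem.Str.lower tn) (PySem.Str.lower tbl)))
        = ts.map (fun tbl => (tbl, lev_memo_py (PySem.Str.lower tn) (PySem.Str.lower tbl))) from
      List.map_congr_left (fun x _ => by rw [lev_eq])]
    set S := ts.map (fun tbl => (tbl, lev_memo_py (PySem.Str.lower tn) (PySem.Str.lower tbl))) with hS
    have hSne : S ≠ [] := by
      intro h
      exact hts (List.map_eq_nil_iff.1 (hS ▸ h))
    obtain ⟨hd, tl, hsrt, hbest⟩ := head_sorted_eq_min S hSne
    rw [hsrt, hbest]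
    rw [show PySem.List.pyGetD (hd :: tl) 0 ("", (0 : Int)) = hd from by
      rw [PySem.List.pyGetD_ofNat']; rfl]
    have hslice : PySem.List.slice (hd :: tl) none (some 3) = hd :: List.take 2 tl := by
      rw [PySem.List.slice_to (hd :: tl) (by norm_num : (0:Int) ≤ 3)]
      rfl
    by_cases hg : hd.2 ≤ PySem.Str.len tn
    · rw [if_neg (not_lt.2 hg)]
      rw [show (fun (_ : String × Int) => decide (hd.2 ≤ PySem.Str.len tn)) = (fun _ => true) from by
        funext _; exact decide_eq_true hg]
      rw [List.filter_true]
      rw [if_neg (by rw [hslice]; simp)]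
    · rw [if_pos (not_le.1 hg)]
      rw [show (fun (_ : String × Int) => decide (hd.2 ≤ PySem.Str.len tn)) = (fun _ => false) from by
        funext _; exact decide_eq_false hg]
      rw [List.filter_false]
      simp
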